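-- pv_equiv track=rewrite | github.com/lorenzopetrella/ktree | corso_progetto/custom_libraries/aktree.py | assign_pixels
-- ===== SOURCE A (Python) =====
-- def assign_pixels(layers, index, depth, next_pixel):
--     if depth == 0:
--         if layers[0][0] == 1:
--             layers[0][0] = next_pixel
--             next_pixel += 1
--         else:
--             next_pixel = assign_pixels(layers, 0, 1, next_pixel)
--         if layers[0][1] == 1:
--             layers[0][1] = next_pixel
--             next_pixel += 1
--         else:
--             next_pixel = assign_pixels(layers, 1, 1, next_pixel)
--     else:
--         if layers[depth][2 * index] == 1:
--             layers[depth][2 * index] = next_pixel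
--             next_pixel += 1
--         elif layers[depth][2 * index] == 0:
--             next_pixel = assign_pixels(layers, 2 * index, depth + 1, next_pixel)
--         if layers[depth][2 * index + 1] == 1:
--             layers[depth][2 * index + 1] = next_pixel
--             next_pixel += 1
--         elif layers[depth][2 * index + 1] == 0:
--             next_pixel = assign_pixels(layers, 2 * index + 1, depth + 1, next_pixel)
--
--     return next_pixel
-- ===== SOURCE B (Python) =====
-- def assign_pixels(layers, index, depth, next_pixel):
--     if depth == 0:
--         stack = [(0, 1), (0, 0)]
--     else:
--         stack = [(depth, 2 * index + 1), (depth, 2 * index)]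
--     while stack:
--         L, P = stack.pop()
--         v = layers[L][P]
--         if v == 1:
--             layers[L][P] = next_pixel
--             next_pixel += 1
--         elif L == 0 or v == 0:
--             stack.append((L + 1, 2 * P + 1))
--             stack.append((L + 1, 2 * P))
--     return next_pixel
-- ===== Notes on version B (the rewrite author's own statement) =====
-- stated objective: alternative
-- what changed: The recursive DFS over (index, depth) call frames is replaced by an iterative explicit-stack loop over (layer, position) slots, seeded with the two root slots and pushing the two children in reverse so the left child is processed first.
-- outside the precondition, e.g. on assign_pixels([[1, 1, 9, 9], [3, 0, 5, 5, 5, 5, 5, 5]], 0, -1, 10): A returns 12, B returns 10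
import Mathlib
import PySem

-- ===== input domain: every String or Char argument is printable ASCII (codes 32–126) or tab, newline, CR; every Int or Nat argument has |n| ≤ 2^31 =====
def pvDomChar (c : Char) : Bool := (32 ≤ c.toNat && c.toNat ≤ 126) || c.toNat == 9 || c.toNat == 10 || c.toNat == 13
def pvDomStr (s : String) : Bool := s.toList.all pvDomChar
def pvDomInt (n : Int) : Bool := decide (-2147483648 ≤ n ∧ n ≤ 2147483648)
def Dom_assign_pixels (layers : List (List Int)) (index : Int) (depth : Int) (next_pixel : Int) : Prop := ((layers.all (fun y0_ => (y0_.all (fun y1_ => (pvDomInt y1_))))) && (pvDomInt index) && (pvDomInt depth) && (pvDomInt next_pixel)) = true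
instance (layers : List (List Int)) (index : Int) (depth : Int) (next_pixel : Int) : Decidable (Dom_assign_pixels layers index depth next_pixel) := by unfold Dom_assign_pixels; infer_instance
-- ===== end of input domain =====

-- B replaces A's recursion over (index, depth) call frames by an iterative explicit-stack loop over
-- (layer, position) slots (same slots, same order, same in-place writes); the equivalence proved here is
-- about the RETURN value only (both Pythons mutate `layers` identically on inputs satisfying Pre_).

-- shared subscript helper: layers[L][P] with Python semantics (negative wrap; none = IndexError)
def pvRead (layers : List (List Int)) (L P : Int) : Option Int :=
  (PySem.List.pyGet? layers L).bind (fun row => PySem.List.pyGet? row P)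

-- needed by the termination proofs of both ports
theorem pvRead_lt {layers : List (List Int)} {L P v : Int}
    (h : pvRead layers L P = some v) : L < (layers.length : Int) := by
  unfold pvRead at h
  cases hg : PySem.List.pyGet? layers L with
  | none => rw [hg] at h; simp at h
  | some row =>
    by_contra hn
    have : PySem.List.pyGet? layers L = none := by
      rw [PySem.List.pyGet?_eq_none_iff]
      intro hin
      exact hn hin.2
    rw [this] at hg; simp at hg

-- ===== PORT A =====
def assign_pixels (layers : List (List Int)) (index : Int) (depth : Int) (next_pixel : Int) : Int :=
  if _h0 : depth = 0 then
    let np1 : Int :=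
      match _h1 : pvRead layers 0 0 with
      | some v => if v = 1 then next_pixel + 1 else assign_pixels layers 0 1 next_pixel
      | none => next_pixel       -- Python raises IndexError here (outside Pre_)
    match _h2 : pvRead layers 0 1 with
    | some v => if v = 1 then np1 + 1 else assign_pixels layers 1 1 np1
    | none => np1                -- Python raises IndexError here (outside Pre_)
  else
    let np1 : Int :=
      match _h1 : pvRead layers depth (2*index) with
      | some v => if v = 1 then next_pixel + 1
                  else if v = 0 then assign_pixels layers (2*index) (depth+1) next_pixel
                  else next_pixel
      | none => next_pixel       -- Python raises IndexError here (outside Pre_)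
    match _h2 : pvRead layers depth (2*index+1) with
    | some v => if v = 1 then np1 + 1
                else if v = 0 then assign_pixels layers (2*index+1) (depth+1) np1
                else np1
    | none => np1                -- Python raises IndexError here (outside Pre_)
termination_by ((layers.length : Int) + 1 - depth).toNat
decreasing_by
  · omega
  · omega
  · have := pvRead_lt _h1; omega
  · have := pvRead_lt _h2; omega

-- ===== PORT B =====
-- the stack's head is the Python list's last element (pop/append happen at the head)
def pvStep (layers : List (List Int)) : List (Int × Int) → Int → Int
  | [], np => np
  | (L, P) :: rest, next_pixel =>
    match _h : pvRead layers L P with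
    | some v =>
      if v = 1 then pvStep layers rest (next_pixel + 1)
      else if L = 0 ∨ v = 0 then pvStep layers ((L+1, 2*P) :: (L+1, 2*P+1) :: rest) next_pixel
      else pvStep layers rest next_pixel
    | none => pvStep layers rest next_pixel   -- Python raises IndexError here (outside Pre_)
termination_by stack _ => (stack.map (fun s => 3 ^ (((layers.length : Int) + 1) - s.1).toNat)).sum
decreasing_by
  · have h3 : 0 < 3 ^ (((layers.length : Int) + 1) - L).toNat := Nat.pow_pos (by norm_num)
    simp only [List.map_cons, List.sum_cons]; omega
  · have hL := pvRead_lt _h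
    have hc : (((layers.length : Int) + 1) - L).toNat = (((layers.length : Int) + 1) - (L+1)).toNat + 1 := by omega
    simp only [List.map_cons, List.sum_cons, hc, pow_succ]
    have h3 : 0 < 3 ^ (((layers.length : Int) + 1) - (L+1)).toNat := Nat.pow_pos (by norm_num)
    omega
  · have h3 : 0 < 3 ^ (((layers.length : Int) + 1) - L).toNat := Nat.pow_pos (by norm_num)
    simp only [List.map_cons, List.sum_cons]; omega
  · have h3 : 0 < 3 ^ (((layers.length : Int) + 1) - L).toNat := Nat.pow_pos (by norm_num)
    simp only [List.map_cons, List.sum_cons]; omega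

def assign_pixels_alt (layers : List (List Int)) (index : Int) (depth : Int) (next_pixel : Int) : Int :=
  pvStep layers
    (if depth = 0 then [(0, 0), (0, 1)]
     else [(depth, 2*index), (depth, 2*index + 1)])
    next_pixel

-- ===== PRECONDITION & SPEC =====
-- descend condition of the traversal at slot (l, a): the stored value sends the walk to the children
-- (out-of-range reads default to 1 = "no descend"; such slots are flagged at their own layer)
def pvDc (layers : List (List Int)) (l a : Int) : Prop :=
  PySem.List.pyGetD (PySem.List.pyGetD layers l []) a 1 ≠ 1 ∧
    (l = 0 ∨ PySem.List.pyGetD (PySem.List.pyGetD layers l []) a 1 = 0)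

-- all proper ancestors of slot (d + k, q) down to layer d satisfy the descend condition
def pvChain (layers : List (List Int)) (d : Int) (k : Nat) (q : Int) : Prop :=
  ∀ m : Nat, m ≤ k → 1 ≤ m → pvDc layers (d + (k : Int) - (m : Int)) (PySem.Int.floordiv q (2 ^ m))

-- Pre_ is a closed-form description of the traversal's footprint: the seed row exists, and every slot whose
-- ancestor chain makes it reachable is in range, with no descend out of the deepest admissible layer.
-- For 0 ≤ depth this is exactly the set of inputs on which the Python A returns (no IndexError).
-- STATED NARROWING: for depth < 0 (Python wraparound) it additionally excludes traversals that descend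
-- from layer -1 into layer 0, where A restarts at the root slots and may re-read cells it already
-- overwrote — an accident of negative-index wraparound on which A's value is not tree-shaped;
-- B does the natural thing there (keeps walking the slots it was pointed at).
def Pre_assign_pixels (layers : List (List Int)) (index : Int) (depth : Int) (next_pixel : Int) : Prop :=
  1 ≤ layers.length ∧ -(layers.length : Int) ≤ depth ∧ depth < (layers.length : Int) ∧
  (∀ k : Nat, k ≤ (if 0 ≤ depth then (layers.length : Int) - 1 - depth else -1 - depth).toNat →
    ∀ j : Nat, j < 2 ^ (k + 1) →
      pvChain layers depth k (2 * (if depth = 0 then 0 else index) * (2 ^ k : Int) + (j : Int)) →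
        (PySem.Raise.InRange
            (PySem.List.pyGetD layers (depth + (k : Int)) []).length
            (2 * (if depth = 0 then 0 else index) * (2 ^ k : Int) + (j : Int)) ∧
         (k = (if 0 ≤ depth then (layers.length : Int) - 1 - depth else -1 - depth).toNat →
           ¬ pvDc layers (depth + (k : Int)) (2 * (if depth = 0 then 0 else index) * (2 ^ k : Int) + (j : Int)))))

instance (layers : List (List Int)) (index : Int) (depth : Int) (next_pixel : Int) :
    Decidable (Pre_assign_pixels layers index depth next_pixel) := by
  haveI : ∀ (l a : Int), Decidable (pvDc layers l a) := fun l a => by unfold pvDc; infer_instance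
  haveI : ∀ (d : Int) (k : Nat) (q : Int), Decidable (pvChain layers d k q) := fun d k q => by
    unfold pvChain; infer_instance
  unfold Pre_assign_pixels; infer_instance

def pvWitness_assign_pixels : List (List Int) × Int × Int × Int := ([[1, 1]], 0, 0, 0)

def Spec_assign_pixels (layers : List (List Int)) (index : Int) (depth : Int) (next_pixel : Int) (out : Int) : Prop := out = assign_pixels_alt layers index depth next_pixel
instance (layers : List (List Int)) (index : Int) (depth : Int) (next_pixel : Int) (out : Int) : Decidable (Spec_assign_pixels layers index depth next_pixel out) := by unfold Spec_assign_pixels; infer_instance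

-- ===== CLAIM (what is proved, stated in full; the proofs are below) =====
def Claim_equal_assign_pixels : Prop := ∀ (layers : List (List Int)) (index : Int) (depth : Int) (next_pixel : Int), Dom_assign_pixels layers index depth next_pixel → Pre_assign_pixels layers index depth next_pixel → Spec_assign_pixels layers index depth next_pixel (assign_pixels layers index depth next_pixel)

-- ===== LEMMAS AND PROOFS =====

-- the value the traversal produces for one slot and everything below it
def pvSlot (layers : List (List Int)) (L P np : Int) : Int :=
  match _h : pvRead layers L P with
  | some v =>
    if v = 1 then np + 1
    else if L = 0 ∨ v = 0 then pvSlot layers (L+1) (2*P+1) (pvSlot layers (L+1) (2*P) np)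
    else np
  | none => np
termination_by (((layers.length : Int) + 1) - L).toNat
decreasing_by
  · have := pvRead_lt _h; omega
  · have := pvRead_lt _h; omega


theorem pvSlot_none' {layers : List (List Int)} {L P np : Int}
    (h : pvRead layers L P = none) : pvSlot layers L P np = np := by
  rw [pvSlot, h]

theorem pvRead_getD {layers : List (List Int)} {L P v : Int}
    (h : pvRead layers L P = some v) :
    PySem.List.pyGetD (PySem.List.pyGetD layers L []) P 1 = v := by
  unfold pvRead at h
  cases hg : PySem.List.pyGet? layers L with
  | none => rw [hg] at h; simp at h
  | some row =>
    rw [hg] at h; simp only [Option.bind_some] at h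
    simp [PySem.List.pyGetD, hg, h]

theorem pvRead_none {layers : List (List Int)} {L P : Int}
    (h : (layers.length : Int) < L) : pvRead layers L P = none := by
  unfold pvRead
  have : PySem.List.pyGet? layers L = none := by
    rw [PySem.List.pyGet?_eq_none_iff]; intro hin; have := hin.2; omega
  rw [this]; rfl

theorem pvStep_cons (layers : List (List Int)) :
    ∀ (k : Nat) (L P : Int), (((layers.length : Int) + 1) - L).toNat ≤ k →
    ∀ (rest : List (Int × Int)) (np : Int),
      pvStep layers ((L, P) :: rest) np = pvStep layers rest (pvSlot layers L P np) := by
  intro k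
  induction k with
  | zero =>
    intro L P hk rest np
    have hnone : pvRead layers L P = none := pvRead_none (by omega)
    rw [pvStep, pvSlot, hnone]
  | succ k ih =>
    intro L P hk rest np
    rw [pvStep, pvSlot]
    cases h : pvRead layers L P with
    | none => rfl
    | some v =>
      have hL := pvRead_lt h
      have hk' : (((layers.length : Int) + 1) - (L+1)).toNat ≤ k := by omega
      by_cases h1 : v = 1
      · simp [h1]
      · by_cases h2 : L = 0 ∨ v = 0
        · simp only [h1, if_false, h2, if_true]
          rw [ih (L+1) (2*P) hk', ih (L+1) (2*P+1) hk']
        · simp [h1, h2]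


theorem pvSlot_none {layers : List (List Int)} {L P np : Int}
    (h : (layers.length : Int) < L) : pvSlot layers L P np = np := by
  rw [pvSlot, pvRead_none h]

theorem pvSlot_read {layers : List (List Int)} {L P v : Int} (np : Int)
    (h : pvRead layers L P = some v) :
    pvSlot layers L P np =
      if v = 1 then np + 1
      else if L = 0 ∨ v = 0 then pvSlot layers (L+1) (2*P+1) (pvSlot layers (L+1) (2*P) np)
      else np := by
  rw [pvSlot, h]

theorem goA_root (layers : List (List Int)) (i np : Int) :
  assign_pixels layers i 0 np =
    (let np1 : Int := match pvRead layers 0 0 with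
       | some v => if v = 1 then np + 1 else assign_pixels layers 0 1 np
       | none => np
     match pvRead layers 0 1 with
       | some v => if v = 1 then np1 + 1 else assign_pixels layers 1 1 np1
       | none => np1) := by
  rw [assign_pixels]
  simp only [reduceDIte]
  cases h1 : pvRead layers 0 0 <;> cases h2 : pvRead layers 0 1 <;> rfl

theorem goA_deep (layers : List (List Int)) (i d np : Int) (hd0 : ¬ d = 0) :
  assign_pixels layers i d np =
    (let np1 : Int := match pvRead layers d (2*i) with
       | some v => if v = 1 then np + 1 else if v = 0 then assign_pixels layers (2*i) (d+1) np else np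
       | none => np
     match pvRead layers d (2*i+1) with
       | some v => if v = 1 then np1 + 1 else if v = 0 then assign_pixels layers (2*i+1) (d+1) np1 else np1
       | none => np1) := by
  rw [assign_pixels]
  simp only [hd0, reduceDIte]
  cases h1 : pvRead layers d (2*i) <;> cases h2 : pvRead layers d (2*i+1) <;> rfl

theorem goA_pos (layers : List (List Int)) :
    ∀ (k : Nat) (d : Int), 0 ≤ d → (((layers.length : Int) + 1) - d).toNat ≤ k →
    ∀ (i np : Int),
      assign_pixels layers i d np =
        if d = 0 then pvSlot layers 0 1 (pvSlot layers 0 0 np)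
        else pvSlot layers d (2*i+1) (pvSlot layers d (2*i) np) := by
  intro k
  induction k with
  | zero =>
    intro d hd hk i np
    have hd1 : (layers.length : Int) < d := by omega
    have hd0 : ¬ d = 0 := by omega
    rw [goA_deep layers i d np hd0]
    simp [pvRead_none hd1, pvSlot_none hd1, hd0]
  | succ k ih =>
    intro d hd hk i np
    by_cases hd0 : d = 0
    · subst hd0
      rw [goA_root]
      have hk1 : (((layers.length : Int) + 1) - 1).toNat ≤ k := by omega
      have hone : ¬ (1 : Int) = 0 := by omega
      have s1 : (match pvRead layers 0 0 with
          | some v => if v = 1 then np + 1 else assign_pixels layers 0 1 np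
          | none => np) = pvSlot layers 0 0 np := by
        cases h1 : pvRead layers 0 0 with
        | none => exact (pvSlot_none' h1).symm
        | some v =>
          rw [pvSlot_read np h1]
          by_cases hv : v = 1
          · simp [hv]
          · simp only [hv, if_false]
            rw [ih 1 (by omega) hk1 0 np]
            simp only [hone, if_false]
            norm_num
      have s2 : ∀ np1 : Int, (match pvRead layers 0 1 with
          | some v => if v = 1 then np1 + 1 else assign_pixels layers 1 1 np1
          | none => np1) = pvSlot layers 0 1 np1 := by
        intro np1
        cases h2 : pvRead layers 0 1 with
        | none => exact (pvSlot_none' h2).symm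
        | some v =>
          rw [pvSlot_read np1 h2]
          by_cases hv : v = 1
          · simp [hv]
          · simp only [hv, if_false]
            rw [ih 1 (by omega) hk1 1 np1]
            simp only [hone, if_false]
            norm_num
      simp only []
      rw [s1, s2]
      simp
    · have hne : ¬ (d + 1 = 0) := by omega
      rw [goA_deep layers i d np hd0]
      have step : ∀ (P np0 : Int),
          (match pvRead layers d P with
           | some v => if v = 1 then np0 + 1
               else if v = 0 then assign_pixels layers P (d+1) np0
               else np0
           | none => np0) = pvSlot layers d P np0 := by
        intro P np0
        cases h1 : pvRead layers d P with
        | none => exact (pvSlot_none' h1).symm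
        | some v =>
          rw [pvSlot_read np0 h1]
          by_cases hv : v = 1
          · simp [hv]
          · by_cases hv0 : v = 0
            · have hL := pvRead_lt h1
              have hk' : (((layers.length : Int) + 1) - (d+1)).toNat ≤ k := by omega
              simp only [hv0, if_true, Or.comm]
              rw [ih (d+1) (by omega) hk' P np0]
              simp [hne, hd0]
            · simp [hv, hv0, hd0]
      simp only []
      rw [step, step]
      simp [hd0]
-- for a seed slot (d, P) with d < 0: no slot of the walk below it descends out of layer -1
def pvSlotSafe (layers : List (List Int)) (d P : Int) : Prop :=
  ∀ q : Int, PySem.Int.floordiv q ((2:Int) ^ ((-1 - d).toNat)) = P →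
    pvChain layers d ((-1 - d).toNat) q → ¬ pvDc layers (-1) q

theorem fd_double {q i : Int} {k : Nat}
    (h : PySem.Int.floordiv q (2^k) = 2*i ∨ PySem.Int.floordiv q (2^k) = 2*i + 1) :
    PySem.Int.floordiv q (2^(k+1)) = i := by
  have hpos : (0:Int) < 2^k := by positivity
  have hpos2 : (0:Int) < 2^(k+1) := by positivity
  have e : (2:Int)^(k+1) = 2^k * 2 := by ring
  rw [PySem.Int.floordiv_eq_iff_of_pos hpos2, e]
  rcases h with h | h <;> rw [PySem.Int.floordiv_eq_iff_of_pos hpos] at h <;>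
    constructor <;> nlinarith [h.1, h.2]

theorem childSafe {layers : List (List Int)} {d P : Int} (hd : d < -1)
    (hs : pvSlotSafe layers d P) (hdc : pvDc layers d P) :
    ∀ P' : Int, (P' = 2*P ∨ P' = 2*P + 1) → pvSlotSafe layers (d+1) P' := by
  intro P' hP' q hq hchain
  have hK : (-1 - d).toNat = (-1 - (d+1)).toNat + 1 := by omega
  apply hs q
  · rw [hK]
    apply fd_double
    rcases hP' with h | h <;> [left; right] <;> rw [← h] <;> exact hq
  · intro m hmK h1m
    rw [hK] at hmK
    by_cases hm : m ≤ (-1 - (d+1)).toNat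
    · have hc := hchain m hm h1m
      have e : d + (((-1 - (d+1)).toNat + 1 : Nat) : Int) - (m : Int)
             = (d + 1) + (((-1 - (d+1)).toNat : Nat) : Int) - (m : Int) := by push_cast; ring
      rw [hK, e]
      exact hc
    · have hmeq : m = (-1 - (d+1)).toNat + 1 := by omega
      subst hmeq
      have e : d + (((-1 - (d+1)).toNat + 1 : Nat) : Int) - (((-1 - (d+1)).toNat + 1 : Nat) : Int) = d := by
        push_cast; ring
      rw [hK, e]
      have hfd : PySem.Int.floordiv q (2 ^ ((-1 - (d+1)).toNat + 1)) = P := by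
        apply fd_double
        rcases hP' with h | h <;> [left; right] <;> rw [← h] <;> exact hq
      rw [hfd]
      exact hdc

theorem goA_neg (layers : List (List Int)) :
    ∀ (k : Nat) (d : Int), d < 0 → ((-d).toNat ≤ k) →
    ∀ (i np : Int), pvSlotSafe layers d (2*i) → pvSlotSafe layers d (2*i+1) →
      assign_pixels layers i d np = pvSlot layers d (2*i+1) (pvSlot layers d (2*i) np) := by
  intro k
  induction k with
  | zero => intro d hd hk; exact absurd hk (by omega)
  | succ k ih =>
    intro d hd hk i np hs1 hs2
    have hd0 : ¬ d = 0 := by omega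
    rw [goA_deep layers i d np hd0]
    have step : ∀ (P np0 : Int), pvSlotSafe layers d P →
        (match pvRead layers d P with
         | some v => if v = 1 then np0 + 1
             else if v = 0 then assign_pixels layers P (d+1) np0
             else np0
         | none => np0) = pvSlot layers d P np0 := by
      intro P np0 hsafe
      cases h1 : pvRead layers d P with
      | none => exact (pvSlot_none' h1).symm
      | some v =>
        rw [pvSlot_read np0 h1]
        by_cases hv : v = 1
        · simp [hv]
        · by_cases hv0 : v = 0
          · subst hv0
            have hgd := pvRead_getD h1
            have hdc : pvDc layers d P := ⟨by rw [hgd]; omega, Or.inr hgd⟩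
            by_cases hdm1 : d = -1
            · exfalso
              subst hdm1
              apply hsafe P _ _ hdc
              · simp
              · intro m hm h1m
                exact absurd h1m (by omega)
            · have hd1 : d < -1 := by omega
              have hk' : (-(d+1)).toNat ≤ k := by omega
              simp only []
              rw [ih (d+1) (by omega) hk' P np0
                    (childSafe hd1 hsafe hdc (2*P) (Or.inl rfl))
                    (childSafe hd1 hsafe hdc (2*P+1) (Or.inr rfl))]
              simp
          · simp [hv, hv0, hd0]
    simp only []
    rw [step (2*i) np hs1, step (2*i+1) _ hs2]
theorem pre_safe {layers : List (List Int)} {index depth next_pixel : Int}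
    (hpre : Pre_assign_pixels layers index depth next_pixel) (hd : depth < 0) :
    ∀ P : Int, (P = 2*index ∨ P = 2*index + 1) → pvSlotSafe layers depth P := by
  obtain ⟨h1, h2, h3, h4⟩ := hpre
  intro P hP q hq hchain
  have hb : (if depth = 0 then (0:Int) else index) = index := if_neg (by omega)
  have hKif : (if (0:Int) ≤ depth then (layers.length : Int) - 1 - depth else -1 - depth).toNat
      = (-1 - depth).toNat := by rw [if_neg (by omega)]
  have hpos : (0:Int) < 2 ^ ((-1 - depth).toNat) := by positivity
  have hbr := (PySem.Int.floordiv_eq_iff_of_pos hpos).mp hq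
  have e2 : (2:Int) ^ ((-1 - depth).toNat + 1) = 2 ^ ((-1 - depth).toNat) * 2 := by ring
  have hj0 : 0 ≤ q - 2*index*(2 ^ ((-1 - depth).toNat) : Int) := by
    rcases hP with h | h <;> subst h <;> nlinarith [hbr.1, hbr.2, hpos]
  have hjlt : q - 2*index*(2 ^ ((-1 - depth).toNat) : Int) < 2 ^ ((-1 - depth).toNat + 1) := by
    rcases hP with h | h <;> subst h <;> nlinarith [hbr.1, hbr.2, hpos]
  have hjcast : ((q - 2*index*(2 ^ ((-1 - depth).toNat) : Int)).toNat : Int)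
      = q - 2*index*(2 ^ ((-1 - depth).toNat) : Int) := Int.toNat_of_nonneg hj0
  have hjKn : (q - 2*index*(2 ^ ((-1 - depth).toNat) : Int)).toNat < 2 ^ ((-1 - depth).toNat + 1) := by
    have hcast : ((2 ^ ((-1 - depth).toNat + 1) : Nat) : Int) = (2:Int) ^ ((-1 - depth).toNat + 1) := by
      push_cast; ring
    have : ((q - 2*index*(2 ^ ((-1 - depth).toNat) : Int)).toNat : Int) < ((2 ^ ((-1 - depth).toNat + 1) : Nat) : Int) := by
      rw [hjcast, hcast]; exact hjlt
    exact_mod_cast this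
  have hq_eq : 2 * (if depth = 0 then (0:Int) else index) * (2 ^ ((-1 - depth).toNat) : Int)
      + ((q - 2*index*(2 ^ ((-1 - depth).toNat) : Int)).toNat : Int) = q := by
    rw [hb, hjcast]; ring
  have happ := h4 ((-1 - depth).toNat) (by rw [hKif])
      ((q - 2*index*(2 ^ ((-1 - depth).toNat) : Int)).toNat) hjKn
      (by rw [hq_eq]; exact hchain)
  have hlayer : depth + (((-1 - depth).toNat : Nat) : Int) = -1 := by omega
  have := happ.2 (by rw [hKif])
  rw [hq_eq, hlayer] at this
  exact this
-- ===== VERDICT (by name: the statement is the Claim_ definition above) =====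
theorem assign_pixels_spec : Claim_equal_assign_pixels := by
  intro layers index depth next_pixel hdom hpre
  unfold Spec_assign_pixels assign_pixels_alt
  by_cases hd0 : depth = 0
  · subst hd0
    rw [if_pos rfl,
        goA_pos layers ((((layers.length : Int) + 1) - 0).toNat) 0 le_rfl le_rfl index next_pixel,
        if_pos rfl,
        pvStep_cons layers ((((layers.length : Int) + 1) - 0).toNat) 0 0 le_rfl,
        pvStep_cons layers ((((layers.length : Int) + 1) - 0).toNat) 0 1 le_rfl,
        pvStep]
  · rw [if_neg hd0]
    by_cases hdpos : 0 ≤ depth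
    · rw [goA_pos layers ((((layers.length : Int) + 1) - depth).toNat) depth hdpos le_rfl index next_pixel,
          if_neg hd0,
          pvStep_cons layers ((((layers.length : Int) + 1) - depth).toNat) depth (2*index) le_rfl,
          pvStep_cons layers ((((layers.length : Int) + 1) - depth).toNat) depth (2*index+1) le_rfl,
          pvStep]
    · have hd : depth < 0 := by omega
      rw [goA_neg layers ((-depth).toNat) depth hd le_rfl index next_pixel
            (pre_safe hpre hd (2*index) (Or.inl rfl))
            (pre_safe hpre hd (2*index+1) (Or.inr rfl)),
          pvStep_cons layers ((((layers.length : Int) + 1) - depth).toNat) depth (2*index) le_rfl,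
          pvStep_cons layers ((((layers.length : Int) + 1) - depth).toNat) depth (2*index+1) le_rfl,
          pvStep]
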